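-- pv_equiv track=rewrite | github.com/lastylegp/PyCGMS | tools.py | _zipcode_get_sector_order
-- ===== SOURCE A (Python) =====
-- ZIPCODE_TRACK_SECTOR_MAX = (
--     (21, (1, 17)),   # Tracks 1-17: 21 sectors (0-20)
--     (19, (18, 24)),  # Tracks 18-24: 19 sectors (0-18)
--     (18, (25, 30)),  # Tracks 25-30: 18 sectors (0-17)
--     (17, (31, 35)),  # Tracks 31-35: 17 sectors (0-16)
-- )
--
-- def _zipcode_get_sectors_for_track(track):
--     """Return number of sectors for a given track."""
--     for sectors, track_range in ZIPCODE_TRACK_SECTOR_MAX: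
--         if track_range[0] <= track <= track_range[1]:
--             return sectors
--     return 0
--
-- def _zipcode_get_interleave_for_track(track):
--     """Return interleave value for a given track."""
--     num_sectors = _zipcode_get_sectors_for_track(track)
--     return (num_sectors + 1) // 2
--
-- def _zipcode_get_sector_order(track):
--     """Return sector order with interleave for a given track."""
--     num_sectors = _zipcode_get_sectors_for_track(track)
--     interleave = _zipcode_get_interleave_for_track(track)
--
--     order = []
--     for i in range(interleave):
--         order.append(i)
--         if i + interleave < num_sectors:
--             order.append(i + interleave)
--
--     return order
-- ===== SOURCE B (Python) =====
-- ZIPCODE_TRACK_SECTOR_MAX = (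
--     (21, (1, 17)),
--     (19, (18, 24)),
--     (18, (25, 30)),
--     (17, (31, 35)),
-- )
--
-- def _zipcode_get_sectors_for_track(track):
--     for sectors, track_range in ZIPCODE_TRACK_SECTOR_MAX:
--         if track_range[0] <= track <= track_range[1]:
--             return sectors
--     return 0
--
-- def _zipcode_get_sector_order(track):
--     num_sectors = _zipcode_get_sectors_for_track(track)
--     interleave = (num_sectors + 1) // 2
--     return [p // 2 if p % 2 == 0 else interleave + p // 2 for p in range(num_sectors)]
-- ===== Notes on version B (the rewrite author's own statement) =====
-- stated objective: simpler
-- what changed: Replaces the pair-appending loop over interleave slots (with an inner bounds conditional) by a single comprehension over output positions using the closed-form parity mapping (halved position, offset by the interleave on odd positions).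
import Mathlib
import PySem

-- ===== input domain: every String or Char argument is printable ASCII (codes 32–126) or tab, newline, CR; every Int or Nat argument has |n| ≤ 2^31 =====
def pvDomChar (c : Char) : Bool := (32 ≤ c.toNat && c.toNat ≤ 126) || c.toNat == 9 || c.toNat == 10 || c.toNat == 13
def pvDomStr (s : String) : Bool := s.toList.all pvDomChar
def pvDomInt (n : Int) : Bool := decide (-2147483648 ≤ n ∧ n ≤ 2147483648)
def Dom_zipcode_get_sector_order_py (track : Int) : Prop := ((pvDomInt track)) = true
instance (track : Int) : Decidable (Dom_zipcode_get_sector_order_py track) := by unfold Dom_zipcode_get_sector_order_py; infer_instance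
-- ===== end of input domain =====

-- B is the same table lookup but builds the order list by a single comprehension over
-- output positions with the closed-form parity mapping, instead of A's pair-appending
-- loop with an inner bounds conditional (objective: simpler).

-- ===== PORT A =====
-- loop over the literal tuple ZIPCODE_TRACK_SECTOR_MAX, transliterated as a fold over the literal list
def zgTable : List (Int × (Int × Int)) := [(21, (1, 17)), (19, (18, 24)), (18, (25, 30)), (17, (31, 35))]

def zgSectorsGo (track : Int) : List (Int × (Int × Int)) → Int
  | [] => 0
  | (sectors, tr) :: rest => if tr.1 ≤ track ∧ track ≤ tr.2 then sectors else zgSectorsGo track rest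

def zipcode_get_sectors_for_track (track : Int) : Int := zgSectorsGo track zgTable

def zipcode_get_interleave_for_track (track : Int) : Int :=
  let num_sectors := zipcode_get_sectors_for_track track
  PySem.Int.floordiv (num_sectors + 1) 2

def zipcode_get_sector_order_py (track : Int) : List Int :=
  let num_sectors := zipcode_get_sectors_for_track track
  let interleave := zipcode_get_interleave_for_track track
  (PySem.List.pyRange 0 interleave 1).foldl
    (fun order i =>
      let order := order ++ [i]
      if i + interleave < num_sectors then order ++ [i + interleave] else order)
    []

-- ===== PORT B =====
def zipcode_get_sector_order_py_alt (track : Int) : List Int :=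
  let num_sectors := zipcode_get_sectors_for_track track
  let interleave := PySem.Int.floordiv (num_sectors + 1) 2
  (PySem.List.pyRange 0 num_sectors 1).map
    (fun p => if PySem.Int.mod p 2 == 0 then PySem.Int.floordiv p 2
              else interleave + PySem.Int.floordiv p 2)

-- ===== PRECONDITION & SPEC =====
def Spec_zipcode_get_sector_order_py (track : Int) (out : List Int) : Prop := out = zipcode_get_sector_order_py_alt track
instance (track : Int) (out : List Int) : Decidable (Spec_zipcode_get_sector_order_py track out) := by unfold Spec_zipcode_get_sector_order_py; infer_instance

-- ===== CLAIM (what is proved, stated in full; the proofs are below) =====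
def Claim_equal_zipcode_get_sector_order_py : Prop := ∀ (track : Int), Dom_zipcode_get_sector_order_py track → Spec_zipcode_get_sector_order_py track (zipcode_get_sector_order_py track)

-- ===== LEMMAS AND PROOFS =====

-- ===== VERDICT (by name: the statement is the Claim_ definition above) =====
theorem zipcode_get_sector_order_py_spec : Claim_equal_zipcode_get_sector_order_py := by
  intro track _
  unfold Spec_zipcode_get_sector_order_py zipcode_get_sector_order_py zipcode_get_sector_order_py_alt
    zipcode_get_interleave_for_track zipcode_get_sectors_for_track zgTable
  simp only [zgSectorsGo]
  split_ifs <;> decide
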